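-- pv_equiv track=rewrite | github.com/HighDiceRoller/icepool | src/icepool/pool/cost.py | lo_hi_skip
-- ===== SOURCE A (Python) =====
-- def lo_hi_skip(count_dice: tuple[int, ...]) -> tuple[int, int]:
--     """Returns the number of dice that can be skipped from the ends of count_dice.
--
--     Returns:
--         lo_skip: The number of dice that can be skipped on the low side.
--         hi_skip: The number of dice that can be skipped on the high side.
--     """
--     for lo_skip, count in enumerate(count_dice):
--         if count:
--             break
--     else:
--         return len(count_dice), len(count_dice)
--
--     for hi_skip, count in enumerate(reversed(count_dice)):
--         if count:
--             return lo_skip, hi_skip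
--
--     # Should never reach here.
--     raise RuntimeError('Should not be reached.')
-- ===== SOURCE B (Python) =====
-- def lo_hi_skip(count_dice):
--     """Returns the number of dice that can be skipped from the ends of count_dice."""
--     nz = [i for i, c in enumerate(count_dice) if c]
--     n = len(count_dice)
--     if not nz:
--         return n, n
--     return nz[0], n - 1 - nz[-1]
-- ===== Notes on version B (the rewrite author's own statement) =====
-- stated objective: simpler
-- what changed: Replaces A's two early-breaking end scans (forward and over reversed input) by one pass that collects all nonzero indices, recovering the high-side skip arithmetically from the last index.
import Mathlib
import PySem

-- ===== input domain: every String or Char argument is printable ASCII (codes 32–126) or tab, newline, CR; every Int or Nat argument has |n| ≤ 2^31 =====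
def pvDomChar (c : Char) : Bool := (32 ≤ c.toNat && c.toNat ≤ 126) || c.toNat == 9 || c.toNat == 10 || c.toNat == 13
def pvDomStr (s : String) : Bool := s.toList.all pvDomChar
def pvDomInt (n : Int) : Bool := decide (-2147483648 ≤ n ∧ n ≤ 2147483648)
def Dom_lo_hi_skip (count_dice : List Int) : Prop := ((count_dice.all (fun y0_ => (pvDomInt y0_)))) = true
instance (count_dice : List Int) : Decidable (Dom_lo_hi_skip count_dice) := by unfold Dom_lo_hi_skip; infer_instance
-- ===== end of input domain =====

-- B replaces A's two early-breaking end scans by one index-collecting pass plus arithmetic (objective: simpler).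

-- ===== PORT A =====
-- A's for/enumerate loop with break: returns the first index (from offset i) whose count is nonzero.
def loScanA : List Int → Int → Option Int
  | [], _ => none
  | c :: rest, i => if c ≠ 0 then some i else loScanA rest (i + 1)

def lo_hi_skip (count_dice : List Int) : Int × Int :=
  match loScanA count_dice 0 with
  | none => ((count_dice.length : Int), (count_dice.length : Int))
  | some lo_skip =>
    match loScanA count_dice.reverse 0 with
    | some hi_skip => (lo_skip, hi_skip)
    | none => (0, 0)  -- Python raises RuntimeError here; the branch is unreachable (first scan found a nonzero)

-- ===== PORT B =====
-- the comprehension [i for i, c in enumerate(count_dice) if c]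
def collectNZ : List Int → Int → List Int
  | [], _ => []
  | c :: rest, i => if c ≠ 0 then i :: collectNZ rest (i + 1) else collectNZ rest (i + 1)

def lo_hi_skip_alt (count_dice : List Int) : Int × Int :=
  let nz := collectNZ count_dice 0
  let n : Int := count_dice.length
  match nz.head?, nz.getLast? with
  | some a, some b => (a, n - 1 - b)
  | _, _ => (n, n)

-- ===== PRECONDITION & SPEC =====
def Spec_lo_hi_skip (count_dice : List Int) (out : Int × Int) : Prop := out = lo_hi_skip_alt count_dice
instance (count_dice : List Int) (out : Int × Int) : Decidable (Spec_lo_hi_skip count_dice out) := by unfold Spec_lo_hi_skip; infer_instance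

-- ===== CLAIM (what is proved, stated in full; the proofs are below) =====
def Claim_equal_lo_hi_skip : Prop := ∀ (count_dice : List Int), Dom_lo_hi_skip count_dice → Spec_lo_hi_skip count_dice (lo_hi_skip count_dice)

-- ===== LEMMAS AND PROOFS =====

theorem head?_collectNZ (cd : List Int) (i : Int) : (collectNZ cd i).head? = loScanA cd i := by
  induction cd generalizing i with
  | nil => rfl
  | cons c rest ih =>
    simp only [collectNZ, loScanA]
    split_ifs with h
    · rfl
    · exact ih (i + 1)

theorem collectNZ_shift (cd : List Int) (i : Int) :
    collectNZ cd (i + 1) = (collectNZ cd i).map (· + 1) := by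
  induction cd generalizing i with
  | nil => rfl
  | cons c rest ih =>
    simp only [collectNZ]
    split_ifs with h
    · simp [ih (i + 1)]
    · exact ih (i + 1)

theorem collectNZ_append (xs ys : List Int) (i : Int) :
    collectNZ (xs ++ ys) i = collectNZ xs i ++ collectNZ ys (i + xs.length) := by
  induction xs generalizing i with
  | nil => simp [collectNZ]
  | cons c rest ih =>
    have hlen : i + 1 + (rest.length : Int) = i + ((c :: rest).length : Int) := by
      push_cast [List.length_cons]; ring
    simp only [List.cons_append, collectNZ]
    split_ifs with h
    · rw [ih (i + 1), hlen]; simp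
    · rw [ih (i + 1), hlen]

theorem collectNZ_reverse (cd : List Int) (i : Int) :
    collectNZ cd.reverse i =
      ((collectNZ cd i).reverse).map (fun j => 2 * i + cd.length - 1 - j) := by
  induction cd generalizing i with
  | nil => rfl
  | cons c rest ih =>
    rw [List.reverse_cons, collectNZ_append, ih i, List.length_reverse]
    simp only [collectNZ, List.length_cons]
    split_ifs with h
    · simp only [List.reverse_cons, List.map_append, List.map_cons, List.map_nil,
        collectNZ_shift rest i, ← List.map_reverse, List.map_map]
      congr 1
      · apply List.map_congr_left
        intro a _
        simp only [Function.comp_apply]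
        push_cast; ring
      · refine congrArg (fun x => [x]) ?_
        push_cast [List.length_cons]; ring
    · simp only [List.append_nil, collectNZ_shift rest i, ← List.map_reverse, List.map_map]
      apply List.map_congr_left
      intro a _
      simp only [Function.comp_apply]
      push_cast; ring

theorem loScanA_reverse (cd : List Int) :
    loScanA cd.reverse 0 =
      ((collectNZ cd 0).getLast?).map (fun j => (cd.length : Int) - 1 - j) := by
  rw [← head?_collectNZ, collectNZ_reverse, List.head?_map, List.head?_reverse]
  congr 1
  funext j
  ring

-- ===== VERDICT (by name: the statement is the Claim_ definition above) =====
theorem lo_hi_skip_spec : Claim_equal_lo_hi_skip := by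
  intro cd _
  unfold Spec_lo_hi_skip lo_hi_skip lo_hi_skip_alt
  rcases hnz : collectNZ cd 0 with _ | ⟨a, t⟩
  · have h0 : loScanA cd 0 = none := by rw [← head?_collectNZ, hnz]; rfl
    simp [h0]
  · have h0 : loScanA cd 0 = some a := by rw [← head?_collectNZ, hnz]; rfl
    obtain ⟨b, hlast⟩ : ∃ b, (a :: t).getLast? = some b := by
      cases hb : (a :: t).getLast? with
      | none => simp at hb
      | some b => exact ⟨b, rfl⟩
    have hrev : loScanA cd.reverse 0 = some ((cd.length : Int) - 1 - b) := by
      rw [loScanA_reverse, hnz, hlast]; rfl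
    simp [h0, hrev, hlast]
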